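-- pv_equiv track=rewrite | github.com/jloescher/infrastructure | dashboard/services/framework.py | detect_framework_from_files
-- ===== SOURCE A (Python) =====
-- from typing import Dict, List, Optional, Any, Tuple
--
-- def detect_framework_from_files(files: List[str]) -> Optional[str]:
--     """
--     Detect framework from a list of files present in the repository.
--
--     Args:
--         files: List of filenames present in the repository root
--
--     Returns:
--         Framework name or None if not detected
--     """
--     file_set = set(f.lower() for f in files)
--
--     # Check for Laravel (highest priority for PHP apps)
--     if "artisan" in file_set or "composer.json" in file_set:
--         return "laravel"
--
--     # Check for Next.js
--     if "next.config.js" in file_set or "next.config.mjs" in file_set: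
--         return "nextjs"
--
--     # Check for SvelteKit
--     if "svelte.config.js" in file_set:
--         return "svelte"
--
--     # Check for Go
--     if "go.mod" in file_set or "main.go" in file_set:
--         return "go"
--
--     # Check for Python
--     python_files = {"requirements.txt", "pyproject.toml", "setup.py"}
--     if file_set & python_files:
--         return "python"
--
--     # Check for package.json with framework detection
--     if "package.json" in file_set:
--         # This will need to be analyzed further
--         return "nextjs"  # Default for Node.js apps
--
--     return None
-- ===== SOURCE B (Python) =====
-- # Single pass over the files with a running minimum "priority" accumulator
-- # (framework = name of the best priority seen), instead of building a set
-- # and testing marker groups branch by branch.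
-- from typing import List, Optional
--
-- _PRIORITY = {
--     "artisan": 0, "composer.json": 0,
--     "next.config.js": 1, "next.config.mjs": 1,
--     "svelte.config.js": 2,
--     "go.mod": 3, "main.go": 3,
--     "requirements.txt": 4, "pyproject.toml": 4, "setup.py": 4,
--     "package.json": 5,
-- }
-- _NAMES = ["laravel", "nextjs", "svelte", "go", "python", "nextjs"]
--
-- def detect_framework_from_files(files: List[str]) -> Optional[str]:
--     best = None
--     for f in files:
--         r = _PRIORITY.get(f.lower())
--         if r is not None and (best is None or r < best):
--             best = r
--     return None if best is None else _NAMES[best]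
-- ===== Notes on version B (the rewrite author's own statement) =====
-- stated objective: alternative
-- what changed: Instead of building a lowercase set and testing six marker groups branch by branch, B makes one pass over the files keeping a running minimum marker priority (each marker filename maps to a priority rank) and finally maps the best rank to its framework name.
import Mathlib
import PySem

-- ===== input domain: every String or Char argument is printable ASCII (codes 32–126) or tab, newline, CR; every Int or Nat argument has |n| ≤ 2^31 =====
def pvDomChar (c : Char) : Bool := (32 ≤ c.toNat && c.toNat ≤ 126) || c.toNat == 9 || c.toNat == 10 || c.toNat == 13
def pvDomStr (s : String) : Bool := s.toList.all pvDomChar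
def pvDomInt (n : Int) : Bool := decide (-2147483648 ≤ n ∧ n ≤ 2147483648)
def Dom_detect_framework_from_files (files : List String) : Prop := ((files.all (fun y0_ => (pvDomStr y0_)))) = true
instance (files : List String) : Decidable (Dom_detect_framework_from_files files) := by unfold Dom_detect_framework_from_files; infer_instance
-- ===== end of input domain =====

-- B replaces A's set-and-branch scheme by a single pass over the files keeping a running
-- minimum marker priority, mapped to a framework name at the end (objective: alternative).


-- ===== PORT A =====
def detect_framework_from_files (files : List String) : Option String :=
  let file_set : PySem.Set String := PySem.Set.ofList (files.map PySem.Str.lower)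
  if PySem.Set.contains file_set "artisan" || PySem.Set.contains file_set "composer.json" then
    some "laravel"
  else if PySem.Set.contains file_set "next.config.js" || PySem.Set.contains file_set "next.config.mjs" then
    some "nextjs"
  else if PySem.Set.contains file_set "svelte.config.js" then
    some "svelte"
  else if PySem.Set.contains file_set "go.mod" || PySem.Set.contains file_set "main.go" then
    some "go"
  else
    let python_files : PySem.Set String := PySem.Set.ofList ["requirements.txt", "pyproject.toml", "setup.py"]
    if PySem.Set.inter file_set python_files ≠ [] then
      some "python"
    else if PySem.Set.contains file_set "package.json" then
      some "nextjs"
    else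
      none

-- ===== PORT B =====
def pvPriority : PySem.Dict String Nat := PySem.Dict.mk
  [("artisan", 0), ("composer.json", 0),
   ("next.config.js", 1), ("next.config.mjs", 1),
   ("svelte.config.js", 2),
   ("go.mod", 3), ("main.go", 3),
   ("requirements.txt", 4), ("pyproject.toml", 4), ("setup.py", 4),
   ("package.json", 5)]

def pvNames : List String := ["laravel", "nextjs", "svelte", "go", "python", "nextjs"]

-- the loop body of Source B: update the running minimum with this file's priority (if any)
def pvStep (acc : Option Nat) (f : String) : Option Nat :=
  match PySem.Dict.get? pvPriority (PySem.Str.lower f) with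
  | none => acc
  | some r =>
    match acc with
    | none => some r
    | some b => if r < b then some r else some b

def detect_framework_from_files_alt (files : List String) : Option String :=
  match files.foldl pvStep none with
  | none => none
  | some b => PySem.List.pyGet? pvNames (Int.ofNat b)

-- ===== PRECONDITION & SPEC =====
def Spec_detect_framework_from_files (files : List String) (out : Option String) : Prop := out = detect_framework_from_files_alt files
instance (files : List String) (out : Option String) : Decidable (Spec_detect_framework_from_files files out) := by unfold Spec_detect_framework_from_files; infer_instance

-- ===== CLAIM (what is proved, stated in full; the proofs are below) =====
def Claim_equal_detect_framework_from_files : Prop := ∀ (files : List String), Dom_detect_framework_from_files files → Spec_detect_framework_from_files files (detect_framework_from_files files)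

-- ===== LEMMAS AND PROOFS =====

-- merging of two partial minima (proof-only view of pvStep's accumulator)
def pvCombine : Option Nat → Option Nat → Option Nat
  | none, y => y
  | some b, none => some b
  | some b, some r => some (min b r)

theorem pvStep_eq (acc : Option Nat) (f : String) :
    pvStep acc f = pvCombine acc (pvStep none f) := by
  unfold pvStep
  cases h : PySem.Dict.get? pvPriority (PySem.Str.lower f) with
  | none => cases acc <;> simp [pvCombine]
  | some r =>
    cases acc with
    | none => simp [pvCombine]
    | some b => dsimp only; split_ifs with hlt <;> simp [pvCombine] <;> omega

theorem pvCombine_assoc (x y z : Option Nat) :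
    pvCombine (pvCombine x y) z = pvCombine x (pvCombine y z) := by
  cases x <;> cases y <;> cases z <;> simp [pvCombine, Nat.min_assoc]

theorem pvFold_acc (files : List String) (acc : Option Nat) :
    files.foldl pvStep acc = pvCombine acc (files.foldl pvStep none) := by
  induction files generalizing acc with
  | nil => cases acc <;> simp [pvCombine]
  | cons f fs ih =>
    simp only [List.foldl_cons]
    rw [ih (pvStep acc f), ih (pvStep none f), pvStep_eq acc f, pvCombine_assoc]

def pvAny (files : List String) (k : Nat) : Bool :=
  files.any (fun f => PySem.Dict.get? pvPriority (PySem.Str.lower f) == some k)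

def pvLevels (files : List String) : Option Nat :=
  if pvAny files 0 then some 0 else if pvAny files 1 then some 1
  else if pvAny files 2 then some 2 else if pvAny files 3 then some 3
  else if pvAny files 4 then some 4 else if pvAny files 5 then some 5 else none

set_option maxHeartbeats 1000000 in
theorem pvPriority_range (s : String) (r : Nat) (h : PySem.Dict.get? pvPriority s = some r) :
    r ≤ 5 := by
  simp only [pvPriority, PySem.Dict.get?_mk_cons] at h
  split_ifs at h <;> (first | (injection h with h; omega) | simp_all [PySem.Dict.get?])

theorem pvFold_eq_levels (files : List String) :
    files.foldl pvStep none = pvLevels files := by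
  induction files with
  | nil => simp [pvLevels, pvAny]
  | cons f fs ih =>
    simp only [List.foldl_cons]
    rw [pvFold_acc, ih]
    cases h : PySem.Dict.get? pvPriority (PySem.Str.lower f) with
    | none =>
      have hs : pvStep none f = none := by simp [pvStep, h]
      have ha : ∀ k, pvAny (f :: fs) k = pvAny fs k := by
        intro k; simp [pvAny, h]
      simp [hs, pvCombine, pvLevels, ha]
    | some r =>
      have hs : pvStep none f = some r := by simp [pvStep, h]
      have ha : ∀ k, pvAny (f :: fs) k = ((r == k) || pvAny fs k) := by
        intro k; simp [pvAny, h]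
      have hr : r ≤ 5 := pvPriority_range _ _ h
      rw [hs]
      unfold pvLevels
      simp only [ha]
      interval_cases r <;>
        (cases hv : fs.foldl pvStep none with
         | none => rw [ih] at hv; unfold pvLevels at hv; split_ifs at hv <;>
             simp_all [pvCombine, pvLevels]
         | some b => rw [ih] at hv; unfold pvLevels at hv; split_ifs at hv <;>
             simp_all [pvCombine, pvLevels] <;> (try omega) <;> (subst hv; simp))

-- Python's truthiness of `s & t`: the intersection is empty iff no element of t lies in s.
theorem inter_eq_nil_iff (s t : List String) :
    (PySem.Set.inter s t = []) ↔ ∀ x ∈ t, x ∉ s := by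
  simp [PySem.Set.inter, PySem.Set.contains, List.filter_eq_nil_iff]
  constructor
  · intro h x hxt hxs; exact h x hxs hxt
  · intro h x hxs hxt; exact h x hxt hxs

-- which strings carry which priority
set_option maxHeartbeats 2000000 in
theorem pvGet_some (s : String) (k : Nat) :
    PySem.Dict.get? pvPriority s = some k ↔
      ((k = 0 ∧ (s = "artisan" ∨ s = "composer.json")) ∨
       (k = 1 ∧ (s = "next.config.js" ∨ s = "next.config.mjs")) ∨
       (k = 2 ∧ s = "svelte.config.js") ∨
       (k = 3 ∧ (s = "go.mod" ∨ s = "main.go")) ∨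
       (k = 4 ∧ (s = "requirements.txt" ∨ s = "pyproject.toml" ∨ s = "setup.py")) ∨
       (k = 5 ∧ s = "package.json")) := by
  simp only [pvPriority, PySem.Dict.get?_mk_cons]
  split_ifs <;> simp only [beq_iff_eq] at * <;> (try subst_vars) <;> simp_all [PySem.Dict.get?] <;> (first | exact eq_comm | tauto)

theorem pvAny_iff (files : List String) (k : Nat) :
    pvAny files k = true ↔ ∃ f ∈ files, PySem.Dict.get? pvPriority (PySem.Str.lower f) = some k := by
  simp [pvAny]

-- A-side branch conditions coincide with the pvAny tests of B's accumulator levels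
theorem pvCondEq (files : List String) (k : Nat) (ts : List String)
    (hts : ∀ s, PySem.Dict.get? pvPriority s = some k ↔ s ∈ ts) :
    (ts.any (fun t => PySem.Set.contains (PySem.Set.ofList (files.map PySem.Str.lower)) t)) = pvAny files k := by
  rw [Bool.eq_iff_iff]
  simp only [List.any_eq_true, PySem.Set.contains_iff, PySem.Set.mem_ofList, List.mem_map,
    pvAny_iff, hts]
  aesop

-- ===== VERDICT (by name: the statement is the Claim_ definition above) =====
set_option maxHeartbeats 2000000 in
theorem detect_framework_from_files_spec : Claim_equal_detect_framework_from_files := by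
  intro files _
  unfold Spec_detect_framework_from_files detect_framework_from_files detect_framework_from_files_alt
  rw [pvFold_eq_levels]
  have e0 : (PySem.Set.contains (PySem.Set.ofList (files.map PySem.Str.lower)) "artisan" ||
             PySem.Set.contains (PySem.Set.ofList (files.map PySem.Str.lower)) "composer.json") = pvAny files 0 := by
    have := pvCondEq files 0 ["artisan", "composer.json"] (by intro s; rw [pvGet_some]; simp)
    simpa using this
  have e1 : (PySem.Set.contains (PySem.Set.ofList (files.map PySem.Str.lower)) "next.config.js" ||
             PySem.Set.contains (PySem.Set.ofList (files.map PySem.Str.lower)) "next.config.mjs") = pvAny files 1 := by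
    have := pvCondEq files 1 ["next.config.js", "next.config.mjs"] (by intro s; rw [pvGet_some]; simp)
    simpa using this
  have e2 : PySem.Set.contains (PySem.Set.ofList (files.map PySem.Str.lower)) "svelte.config.js" = pvAny files 2 := by
    have := pvCondEq files 2 ["svelte.config.js"] (by intro s; rw [pvGet_some]; simp)
    simpa using this
  have e3 : (PySem.Set.contains (PySem.Set.ofList (files.map PySem.Str.lower)) "go.mod" ||
             PySem.Set.contains (PySem.Set.ofList (files.map PySem.Str.lower)) "main.go") = pvAny files 3 := by
    have := pvCondEq files 3 ["go.mod", "main.go"] (by intro s; rw [pvGet_some]; simp)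
    simpa using this
  have e5 : PySem.Set.contains (PySem.Set.ofList (files.map PySem.Str.lower)) "package.json" = pvAny files 5 := by
    have := pvCondEq files 5 ["package.json"] (by intro s; rw [pvGet_some]; simp)
    simpa using this
  have e4 : (PySem.Set.inter (PySem.Set.ofList (files.map PySem.Str.lower))
               (PySem.Set.ofList ["requirements.txt", "pyproject.toml", "setup.py"]) ≠ []) ↔ pvAny files 4 = true := by
    rw [Ne, inter_eq_nil_iff,
      ← pvCondEq files 4 ["requirements.txt", "pyproject.toml", "setup.py"] (by intro s; rw [pvGet_some]; simp)]
    simp only [List.any_eq_true, PySem.Set.contains_iff, PySem.Set.mem_ofList]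
    push_neg
    tauto
  simp only [e0, e1, e2, e3, e5, e4, pvLevels]
  cases h0 : pvAny files 0 <;> cases h1 : pvAny files 1 <;> cases h2 : pvAny files 2 <;>
    cases h3 : pvAny files 3 <;> cases h4 : pvAny files 4 <;> cases h5 : pvAny files 5 <;>
    simp_all [pvNames, PySem.List.pyGet?, PySem.List.pyIdx?]
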